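-- pv_equiv track=rewrite | github.com/sgsokol/influx | influx_si/C13_ftbl.py | src_ind
-- ===== SOURCE A (Python) =====
-- class oset(dict):
--     def __init__(*args, **kwds):
--         self, *args = args
--         if len(args) == 1:
--             for k in args[0]:
--                 self[k]=1
--         elif len(args) > 1:
--             raise TypeError('expected at most 1 arguments, got %d' % len(args))
--     def copy(self):
--         tmp=oset()
--         tmp.update(self)
--         return(tmp)
--     def add(self, x):
--         self[x]=1
--     def difference_update(self, x):
--         for k in x:
--             if k in self:
--                 del(self[k])
--     def difference(self, x):
--         return(self - oset(x))
--     def update(self, x):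
--         if x:
--             for i in x:
--                 self[i]=1
--     def intersection(self, x):
--         return self & oset(x)
--     def __sub__(self, x):
--         tmp=oset(x)
--         return oset(i for i in self if i not in tmp)
--     def __and__(self, x):
--         tmp=oset(x)
--         return oset(i for i in self if i in tmp)
--     def __or__(self, x):
--         tmp=oset(x)
--         tmp.update(self)
--         return tmp
--
-- def src_ind(substrate, product, iprod):
--     """
--     For a given substrate and product carbon strings (e.g. "abc", "ab")
--     calculate substrate index corresponding to product index.
--     Return None if no source found.
--     Return 0 if iprod==0 and intersection of product and substrate strings
--     is not empty"""
--     movbit=1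
--     isubstr=0
--     substrate=substrate[::-1]
--     product=product[::-1]
--     for nb in range(len(product)):
--         if (movbit & iprod):
--             # algo: if the current bit is set in product search for its origin
--             # and set the corresponding bit in substrate
--             try:
--                 isubstr|=1<<substrate.find(product[nb])
--             except ValueError:
--                 pass
--         movbit<<=1
--     return isubstr if (isubstr or
--         (iprod==0 and (oset(product) & oset(substrate)))) else None
-- ===== SOURCE B (Python) =====
-- def src_ind(substrate, product, iprod):
--     """
--     For a given substrate and product carbon strings (e.g. "abc", "ab")
--     calculate substrate index corresponding to product index.
--     Return None if no source found.
--     Return 0 if iprod==0 and intersection of product and substrate strings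
--     is not empty"""
--     srev = substrate[::-1]
--     prev = product[::-1]
--     # stage 1: collect the set of carbon letters requested by the set bits of iprod
--     wanted = set()
--     for nb, c in enumerate(prev):
--         if (1 << nb) & iprod:
--             wanted.add(c)
--     # stage 2: one left-to-right scan of the reversed substrate; the first
--     # occurrence of each wanted letter contributes its position bit
--     isubstr = 0
--     seen = set()
--     for j, c in enumerate(srev):
--         if c not in seen:
--             seen.add(c)
--             if c in wanted:
--                 isubstr |= 1 << j
--     if isubstr or (iprod == 0 and not set(product).isdisjoint(substrate)):
--         return isubstr
--     return None
-- ===== Notes on version B (the rewrite author's own statement) =====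
-- stated objective: faster
-- what changed: A scans the whole substrate with str.find once per product bit (a moving movbit mask with try/except around 1<<find); B instead builds the set of wanted product letters from the set bits in one pass, then makes a single first-occurrence scan of the reversed substrate, setting the bit at each position whose letter is wanted, so the inner find scan disappears.
import Mathlib
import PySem

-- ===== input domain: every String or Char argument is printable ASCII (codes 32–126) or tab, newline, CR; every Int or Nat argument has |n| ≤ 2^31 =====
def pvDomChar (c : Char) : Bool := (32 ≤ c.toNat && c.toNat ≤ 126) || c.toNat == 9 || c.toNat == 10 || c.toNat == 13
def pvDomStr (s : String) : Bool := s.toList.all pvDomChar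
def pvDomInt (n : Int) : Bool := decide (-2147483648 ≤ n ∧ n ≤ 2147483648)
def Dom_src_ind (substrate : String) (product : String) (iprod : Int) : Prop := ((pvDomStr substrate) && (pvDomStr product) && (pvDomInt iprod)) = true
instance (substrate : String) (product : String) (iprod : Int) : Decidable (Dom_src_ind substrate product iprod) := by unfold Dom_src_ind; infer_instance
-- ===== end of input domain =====

-- B replaces A's per-bit substrate.find scan by two staged passes: first collect the set of
-- wanted product letters, then one first-occurrence scan of the reversed substrate; same value.

-- ===== PORT A =====
def src_ind (substrate : String) (product : String) (iprod : Int) : Option Int :=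
  -- substrate[::-1], product[::-1]: s[::-1] is reverse
  let s : List Char := substrate.toList.reverse
  let p : List Char := product.toList.reverse
  -- for nb in range(len(product)) over state (movbit, isubstr); 'if movbit & iprod:' is int truthiness (≠ 0);
  -- '1 << substrate.find(..)' with find = -1 raises ValueError (negative shift), caught by 'except ValueError: pass'
  let st := (PySem.List.pyRange 0 (p.length : Int) 1).foldl
    (fun (st : Int × Int) nb =>
      let isubstr :=
        if PySem.Int.band st.1 iprod ≠ 0 then
          let f := PySem.Chars.find s [PySem.List.pyGetD p nb ' ']
          if f < 0 then st.2 else PySem.Int.bor st.2 ((1 : Int) <<< f.toNat)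
        else st.2
      (st.1 <<< (1 : Nat), isubstr)) ((1 : Int), (0 : Int))
  -- truthiness of 'oset(product) & oset(substrate)': the ordered-set intersection is a nonempty list
  if st.2 ≠ 0 ∨ (iprod = 0 ∧ PySem.Set.inter (PySem.Set.ofList p) (PySem.Set.ofList s) ≠ []) then some st.2 else none

-- ===== PORT B =====
def src_ind_alt (substrate : String) (product : String) (iprod : Int) : Option Int :=
  let s : List Char := substrate.toList.reverse
  let p : List Char := product.toList.reverse
  -- stage 1: wanted = the set of letters at the set bit positions of iprod within the product
  let wanted : PySem.Set Char :=
    (PySem.List.enumerate p 0).foldl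
      (fun w nc => if PySem.Int.band ((1 : Int) <<< nc.1.toNat) iprod ≠ 0 then PySem.Set.add w nc.2 else w)
      PySem.Set.empty
  -- stage 2: one scan of the reversed substrate; the first occurrence of each wanted letter sets its bit
  let st := (PySem.List.enumerate s 0).foldl
    (fun (st : Int × PySem.Set Char) jc =>
      if PySem.Set.contains st.2 jc.2 then st
      else ((if PySem.Set.contains wanted jc.2 then PySem.Int.bor st.1 ((1 : Int) <<< jc.1.toNat) else st.1),
            PySem.Set.add st.2 jc.2))
    ((0 : Int), PySem.Set.empty)
  if st.1 ≠ 0 ∨ (iprod = 0 ∧ ¬ (PySem.Set.isdisjoint (PySem.Set.ofList product.toList) substrate.toList = true))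
    then some st.1 else none

-- ===== PRECONDITION & SPEC =====
def Spec_src_ind (substrate : String) (product : String) (iprod : Int) (out : Option Int) : Prop := out = src_ind_alt substrate product iprod
instance (substrate : String) (product : String) (iprod : Int) (out : Option Int) : Decidable (Spec_src_ind substrate product iprod out) := by unfold Spec_src_ind; infer_instance

-- ===== CLAIM =====
def Claim_equal_src_ind : Prop := ∀ (substrate : String) (product : String) (iprod : Int), Dom_src_ind substrate product iprod → Spec_src_ind substrate product iprod (src_ind substrate product iprod)

-- ===== LEMMAS AND PROOFS =====

-- the per-bit contribution of A: look product[nb] up in the reversed substrate, OR in 1<<pos if found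
def contribF (s p : List Char) (a : Int) (nb : Nat) : Int :=
  if PySem.Chars.find s [p.getD nb ' '] < 0 then a
  else PySem.Int.bor a ((1 : Int) <<< (PySem.Chars.find s [p.getD nb ' ']).toNat)

-- A's loop: movbit is 1 <<< nb at step nb, and isubstr is the guarded fold of contribF
lemma loopA (s p : List Char) (iprod : Int) (n : Nat) (acc : Int) :
    (List.range n).foldl
      (fun (st : Int × Int) (nb : Nat) =>
        (st.1 <<< (1 : Nat),
          if PySem.Int.band st.1 iprod ≠ 0 then
            if PySem.Chars.find s [p.getD nb ' '] < 0 then st.2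
            else PySem.Int.bor st.2 ((1 : Int) <<< (PySem.Chars.find s [p.getD nb ' ']).toNat)
          else st.2))
      ((1 : Int), acc)
    = ((1 : Int) <<< n,
        (List.range n).foldl
          (fun a (nb : Nat) => if PySem.Int.band ((1 : Int) <<< nb) iprod ≠ 0 then contribF s p a nb else a) acc) := by
  induction n with
  | zero => simp
  | succ n ih =>
      rw [List.range_succ]
      simp only [List.foldl_append, List.foldl_cons, List.foldl_nil, ih]
      rw [Prod.mk.injEq]
      refine ⟨?_, rfl⟩
      rw [Int.shiftLeft_eq, Int.shiftLeft_eq, Int.shiftLeft_eq]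
      ring

lemma one_shiftLeft_int (k : Nat) : (1 : Int) <<< ((k : Nat) : Int) = (((1 <<< k : Nat) : Nat) : Int) := by
  rw [Int.one_shiftLeft, Nat.one_shiftLeft]

lemma one_shiftLeft_nat (k : Nat) : (1 : Int) <<< k = (((1 <<< k : Nat) : Nat) : Int) := by
  rw [Int.shiftLeft_eq, Nat.one_shiftLeft]
  push_cast
  ring

-- membership in the stage-1 wanted set
lemma wanted_mem (iprod : Int) (p : List Char) (m : Nat) (w : PySem.Set Char) (c : Char) :
    c ∈ (PySem.List.enumerate p (m : Int)).foldl
        (fun w nc => if PySem.Int.band ((1 : Int) <<< nc.1.toNat) iprod ≠ 0 then PySem.Set.add w nc.2 else w) w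
    ↔ c ∈ w ∨ ∃ k, ∃ _ : k < p.length, PySem.Int.band ((1 : Int) <<< ((m + k : Nat) : Int)) iprod ≠ 0 ∧ p[k] = c := by
  induction p generalizing m w with
  | nil => simp [PySem.List.enumerate_nil]
  | cons d p ih =>
      rw [PySem.List.enumerate_cons, List.foldl_cons]
      have hcast : (m : Int) + 1 = ((m + 1 : Nat) : Int) := by push_cast; ring
      rw [hcast, ih]
      simp only [Int.toNat_natCast]
      constructor
      · rintro (hc | ⟨k, hk, hg, hpk⟩)
        · split_ifs at hc with hg
          · rcases (PySem.Set.mem_add _ _ _).mp hc with h | rfl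
            · exact Or.inl h
            · exact Or.inr ⟨0, by simp, by simpa only [Nat.add_zero] using hg, rfl⟩
          · exact Or.inl hc
        · exact Or.inr ⟨k + 1, by simpa using hk,
            by rw [show m + (k + 1) = m + 1 + k by ring]; exact hg, by simpa using hpk⟩
      · rintro (hc | ⟨k, hk, hg, hpk⟩)
        · split_ifs with hg
          · exact Or.inl ((PySem.Set.mem_add _ _ _).mpr (Or.inl hc))
          · exact Or.inl hc
        · cases k with
          | zero =>
              simp only [List.getElem_cons_zero] at hpk
              subst hpk
              rw [if_pos (by simpa only [Nat.add_zero] using hg)]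
              exact Or.inl ((PySem.Set.mem_add _ _ _).mpr (Or.inr rfl))
          | succ j =>
              exact Or.inr ⟨j, by simpa using hk,
                by rw [show m + 1 + j = m + (j + 1) by ring]; exact hg, by simpa using hpk⟩

-- cast of A's guarded fold to Nat
lemma aFold_cast (iprod : Int) (s p : List Char) (l : List Nat) (n : Nat) :
    l.foldl (fun (a : Int) (nb : Nat) => if PySem.Int.band ((1 : Int) <<< nb) iprod ≠ 0 then contribF s p a nb else a) ((n : Nat) : Int)
    = ((l.foldl (fun (a : Nat) (nb : Nat) =>
        if PySem.Int.band ((1 : Int) <<< nb) iprod ≠ 0 then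
          (if PySem.Chars.find s [p.getD nb ' '] < 0 then a else a ||| (1 <<< (PySem.Chars.find s [p.getD nb ' ']).toNat))
        else a) n : Nat) : Int) := by
  induction l generalizing n with
  | nil => rfl
  | cons nb l ih =>
      simp only [List.foldl_cons]
      have hstep : (if PySem.Int.band ((1 : Int) <<< nb) iprod ≠ 0 then contribF s p ((n : Nat) : Int) nb else ((n : Nat) : Int))
          = (((if PySem.Int.band ((1 : Int) <<< nb) iprod ≠ 0 then
                (if PySem.Chars.find s [p.getD nb ' '] < 0 then n
                 else n ||| (1 <<< (PySem.Chars.find s [p.getD nb ' ']).toNat))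
              else n) : Nat) : Int) := by
        unfold contribF
        split_ifs
        · rfl
        · rw [one_shiftLeft_nat, PySem.Int.bor_natCast]
        · rfl
      rw [hstep, ih]

-- testBit characterisation of A's Nat fold
lemma aFoldN_testBit (iprod : Int) (s p : List Char) (l : List Nat) (n t : Nat) :
    ((l.foldl (fun (a : Nat) (nb : Nat) =>
        if PySem.Int.band ((1 : Int) <<< nb) iprod ≠ 0 then
          (if PySem.Chars.find s [p.getD nb ' '] < 0 then a else a ||| (1 <<< (PySem.Chars.find s [p.getD nb ' ']).toNat))
        else a) n).testBit t = true)
    ↔ n.testBit t = true ∨ ∃ nb ∈ l, PySem.Int.band ((1 : Int) <<< nb) iprod ≠ 0 ∧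
        ¬ PySem.Chars.find s [p.getD nb ' '] < 0 ∧ (PySem.Chars.find s [p.getD nb ' ']).toNat = t := by
  induction l generalizing n with
  | nil => simp
  | cons nb l ih =>
      simp only [List.foldl_cons]
      rw [ih]
      have hstep : ((if PySem.Int.band ((1 : Int) <<< nb) iprod ≠ 0 then
              (if PySem.Chars.find s [p.getD nb ' '] < 0 then n
               else n ||| (1 <<< (PySem.Chars.find s [p.getD nb ' ']).toNat))
            else n).testBit t = true)
          ↔ (n.testBit t = true ∨ (PySem.Int.band ((1 : Int) <<< nb) iprod ≠ 0 ∧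
              ¬ PySem.Chars.find s [p.getD nb ' '] < 0 ∧ (PySem.Chars.find s [p.getD nb ' ']).toNat = t)) := by
        split_ifs with h1 h2
        · constructor
          · exact fun h => Or.inl h
          · rintro (h | ⟨-, hn, -⟩)
            · exact h
            · exact absurd h2 hn
        · rw [Nat.one_shiftLeft, Nat.testBit_or, Nat.testBit_two_pow, Bool.or_eq_true, decide_eq_true_iff]
          constructor
          · rintro (h | h)
            · exact Or.inl h
            · exact Or.inr ⟨h1, h2, h⟩
          · rintro (h | ⟨-, -, h⟩)
            · exact Or.inl h
            · exact Or.inr h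
        · constructor
          · exact fun h => Or.inl h
          · rintro (h | ⟨hg, -, -⟩)
            · exact h
            · exact absurd hg h1
      rw [hstep]
      simp only [List.mem_cons]
      constructor
      · rintro ((h | h) | ⟨x, hx, hP⟩)
        · exact Or.inl h
        · exact Or.inr ⟨nb, Or.inl rfl, h⟩
        · exact Or.inr ⟨x, Or.inr hx, hP⟩
      · rintro (h | ⟨x, rfl | hx, hP⟩)
        · exact Or.inl (Or.inl h)
        · exact Or.inl (Or.inr hP)
        · exact Or.inr ⟨x, hx, hP⟩

-- Nat model of B's stage-2 scan
def bLoopN (W : PySem.Set Char) : List Char → Nat → Nat → PySem.Set Char → Nat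
  | [], _, n, _ => n
  | c :: s, m, n, seen =>
    if PySem.Set.contains seen c then bLoopN W s (m + 1) n seen
    else bLoopN W s (m + 1) (if PySem.Set.contains W c then n ||| (1 <<< m) else n) (PySem.Set.add seen c)

-- B's stage-2 fold computes the cast of bLoopN
lemma bFold_cast (W : PySem.Set Char) (s : List Char) (m n : Nat) (seen : PySem.Set Char) :
    ((PySem.List.enumerate s (m : Int)).foldl
      (fun (st : Int × PySem.Set Char) jc =>
        if PySem.Set.contains st.2 jc.2 then st
        else ((if PySem.Set.contains W jc.2 then PySem.Int.bor st.1 ((1 : Int) <<< jc.1.toNat) else st.1),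
              PySem.Set.add st.2 jc.2))
      (((n : Nat) : Int), seen)).1
    = ((bLoopN W s m n seen : Nat) : Int) := by
  induction s generalizing m n seen with
  | nil => simp [PySem.List.enumerate_nil, bLoopN]
  | cons c s ih =>
      rw [PySem.List.enumerate_cons, List.foldl_cons, bLoopN]
      simp only [Int.toNat_natCast]
      have hcast : (m : Int) + 1 = ((m + 1 : Nat) : Int) := by push_cast; ring
      by_cases hseen : PySem.Set.contains seen c = true
      · rw [if_pos hseen, if_pos hseen, hcast, ih]
      · rw [if_neg hseen, if_neg hseen]
        by_cases hW : PySem.Set.contains W c = true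
        · rw [if_pos hW, if_pos hW, one_shiftLeft_int m, PySem.Int.bor_natCast, hcast]
          exact ih _ _ _
        · rw [if_neg hW, if_neg hW, hcast]
          exact ih _ _ _

-- testBit characterisation of bLoopN: bit t is set iff some wanted, unseen, first-occurrence letter sits at t
lemma bLoopN_testBit (W : PySem.Set Char) (s : List Char) (m n : Nat) (seen : PySem.Set Char) (t : Nat) :
    ((bLoopN W s m n seen).testBit t = true)
    ↔ n.testBit t = true ∨ ∃ pre c suf, s = pre ++ c :: suf ∧ t = m + pre.length ∧ c ∈ W ∧ c ∉ seen ∧ c ∉ pre := by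
  induction s generalizing m n seen with
  | nil => simp [bLoopN]
  | cons d s ih =>
      rw [bLoopN]
      by_cases hseen : PySem.Set.contains seen d = true
      · rw [if_pos hseen, ih]
        have hd : d ∈ seen := (PySem.Set.contains_iff _ _).mp hseen
        constructor
        · rintro (h | ⟨pre, c, suf, rfl, rfl, hW, hsn, hp⟩)
          · exact Or.inl h
          · refine Or.inr ⟨d :: pre, c, suf, rfl, by simp; ring, hW, hsn, ?_⟩
            simp only [List.mem_cons, not_or]
            exact ⟨fun h => hsn (h ▸ hd), hp⟩
        · rintro (h | ⟨pre, c, suf, hsplit, ht, hW, hsn, hp⟩)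
          · exact Or.inl h
          · cases pre with
            | nil =>
                simp only [List.nil_append, List.cons.injEq] at hsplit
                obtain ⟨rfl, rfl⟩ := hsplit
                exact absurd hd hsn
            | cons e pre =>
                simp only [List.cons_append, List.cons.injEq] at hsplit
                obtain ⟨rfl, rfl⟩ := hsplit
                refine Or.inr ⟨pre, c, suf, rfl, by simp at ht ⊢; omega, hW, hsn,
                  fun h => hp (List.mem_cons_of_mem _ h)⟩
      · rw [if_neg hseen, ih]
        have hd : d ∉ seen := fun h => hseen ((PySem.Set.contains_iff _ _).mpr h)
        have hn' : ((if PySem.Set.contains W d then n ||| (1 <<< m) else n).testBit t = true)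
            ↔ (n.testBit t = true ∨ (d ∈ W ∧ t = m)) := by
          by_cases hW : PySem.Set.contains W d = true
          · rw [if_pos hW, Nat.one_shiftLeft, Nat.testBit_or, Nat.testBit_two_pow]
            have hdW : d ∈ W := (PySem.Set.contains_iff _ _).mp hW
            rw [Bool.or_eq_true, decide_eq_true_iff]
            constructor
            · rintro (h | rfl)
              · exact Or.inl h
              · exact Or.inr ⟨hdW, rfl⟩
            · rintro (h | ⟨-, rfl⟩)
              · exact Or.inl h
              · exact Or.inr rfl
          · rw [if_neg hW]
            have hdW : d ∉ W := fun h => hW ((PySem.Set.contains_iff _ _).mpr h)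
            simp [hdW]
        rw [hn']
        constructor
        · rintro ((h | ⟨hdW, rfl⟩) | ⟨pre, c, suf, rfl, rfl, hW, hsn, hp⟩)
          · exact Or.inl h
          · exact Or.inr ⟨[], d, s, rfl, by simp, hdW, hd, by simp⟩
          · have h1 : c ∉ seen ∧ c ≠ d := by
              simpa [PySem.Set.mem_add, not_or] using hsn
            refine Or.inr ⟨d :: pre, c, suf, rfl, by simp; ring, hW, h1.1, ?_⟩
            simp only [List.mem_cons, not_or]
            exact ⟨h1.2, hp⟩
        · rintro (h | ⟨pre, c, suf, hsplit, ht, hW, hsn, hp⟩)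
          · exact Or.inl (Or.inl h)
          · cases pre with
            | nil =>
                simp only [List.nil_append, List.cons.injEq] at hsplit
                obtain ⟨rfl, rfl⟩ := hsplit
                exact Or.inl (Or.inr ⟨hW, by simpa using ht⟩)
            | cons e pre =>
                simp only [List.cons_append, List.cons.injEq] at hsplit
                obtain ⟨rfl, rfl⟩ := hsplit
                have hne : c ≠ d := fun h => hp (by simp [h])
                refine Or.inr ⟨pre, c, suf, rfl, by simp at ht ⊢; omega, hW, ?_,
                  fun h => hp (List.mem_cons_of_mem _ h)⟩
                rw [PySem.Set.mem_add]
                rintro (h | h)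
                · exact hsn h
                · exact hne h

lemma singleton_prefix_iff (l : List Char) (c : Char) : [c] <+: l ↔ ∃ l', l = c :: l' := by
  constructor
  · rintro ⟨r, rfl⟩
    exact ⟨r, rfl⟩
  · rintro ⟨l', rfl⟩
    exact ⟨l', rfl⟩

-- find points at t exactly when t is the first occurrence of c
lemma find_eq_first (s : List Char) (c : Char) (t : Nat) :
    (¬ PySem.Chars.find s [c] < 0 ∧ (PySem.Chars.find s [c]).toNat = t)
    ↔ ∃ pre suf, s = pre ++ c :: suf ∧ t = pre.length ∧ c ∉ pre := by
  constructor
  · rintro ⟨hnn, rfl⟩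
    have hnn' : 0 ≤ PySem.Chars.find s [c] := by omega
    obtain ⟨hpre, hmin⟩ := PySem.Chars.find_spec hnn'
    obtain ⟨suf, hdrop⟩ := (singleton_prefix_iff _ _).mp hpre
    set f := (PySem.Chars.find s [c]).toNat with hf
    have hflen : f < s.length := by
      by_contra h
      rw [List.drop_eq_nil_of_le (by omega)] at hdrop
      cases hdrop
    refine ⟨s.take f, suf, ?_, by simp [List.length_take]; omega, ?_⟩
    · conv_lhs => rw [← List.take_append_drop f s]
      rw [hdrop]
    · intro hc
      obtain ⟨i, hi, hig⟩ := List.getElem_of_mem hc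
      rw [List.getElem_take] at hig
      have hilen : i < f := by simp [List.length_take] at hi; omega
      refine hmin i hilen ((singleton_prefix_iff _ _).mpr ⟨s.drop (i + 1), ?_⟩)
      rw [List.drop_eq_getElem_cons (by omega), hig]
  · rintro ⟨pre, suf, rfl, rfl, hnotpre⟩
    have hinf : [c] <:+: pre ++ c :: suf := ⟨pre, suf, by simp⟩
    have hnn : 0 ≤ PySem.Chars.find (pre ++ c :: suf) [c] :=
      (PySem.Chars.find_nonneg_iff _ _).mpr hinf
    obtain ⟨hpre, hmin⟩ := PySem.Chars.find_spec hnn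
    obtain ⟨suf', hdrop⟩ := (singleton_prefix_iff _ _).mp hpre
    set f := (PySem.Chars.find (pre ++ c :: suf) [c]).toNat with hf
    have h1 : f ≤ pre.length := by
      by_contra h
      exact hmin pre.length (by omega)
        ((singleton_prefix_iff _ _).mpr ⟨suf, by rw [List.drop_left]⟩)
    have h2 : ¬ f < pre.length := by
      intro h
      apply hnotpre
      have hflen : f < (pre ++ c :: suf).length := by simp; omega
      have hgf : (pre ++ c :: suf)[f] = c := by
        have := List.drop_eq_getElem_cons (l := pre ++ c :: suf) (i := f) hflen
        rw [hdrop] at this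
        exact (List.cons.injEq _ _ _ _ ▸ this).1.symm
      rw [List.getElem_append_left h] at hgf
      exact hgf ▸ List.getElem_mem _
    exact ⟨by omega, by omega⟩

-- both final conditions say: some character occurs in both strings
lemma cond_iff (substrate product : String) :
    (PySem.Set.inter (PySem.Set.ofList product.toList.reverse) (PySem.Set.ofList substrate.toList.reverse) ≠ [])
      ↔ ¬ (PySem.Set.isdisjoint (PySem.Set.ofList product.toList) substrate.toList = true) := by
  rw [PySem.Set.isdisjoint_iff, ← List.isEmpty_eq_false_iff, List.isEmpty_eq_false_iff_exists_mem]
  simp only [PySem.Set.mem_inter, PySem.Set.mem_ofList, List.mem_reverse]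
  push Not
  rfl

-- ===== VERDICT (by name: the statement is the Claim_ definition above) =====
theorem src_ind_spec : Claim_equal_src_ind := by
  intro substrate product iprod _dom
  unfold Spec_src_ind src_ind src_ind_alt
  dsimp only
  simp only [List.length_reverse]
  set s := substrate.toList.reverse with hs
  set p := product.toList.reverse with hp
  set L := product.toList.length with hL
  have hplen : p.length = L := by rw [hp, hL, List.length_reverse]
  -- A's loop as a guarded Nat fold over range L
  rw [PySem.List.pyRange_zero_natCast, List.foldl_map]
  simp only [PySem.List.pyGetD_natCast]
  rw [loopA s p iprod L 0]
  dsimp only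
  have hA := aFold_cast iprod s p (List.range L) 0
  have hB := bFold_cast ((PySem.List.enumerate p 0).foldl
      (fun w nc => if PySem.Int.band ((1 : Int) <<< nc.1.toNat) iprod ≠ 0 then PySem.Set.add w nc.2 else w)
      PySem.Set.empty) s 0 0 PySem.Set.empty
  simp only [Nat.cast_zero] at hA hB
  rw [hA, hB]
  -- the two Nat values are bitwise equal
  have hval : (List.range L).foldl (fun (a : Nat) (nb : Nat) =>
        if PySem.Int.band ((1 : Int) <<< nb) iprod ≠ 0 then
          (if PySem.Chars.find s [p.getD nb ' '] < 0 then a else a ||| (1 <<< (PySem.Chars.find s [p.getD nb ' ']).toNat))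
        else a) 0
      = bLoopN ((PySem.List.enumerate p 0).foldl
          (fun w nc => if PySem.Int.band ((1 : Int) <<< nc.1.toNat) iprod ≠ 0 then PySem.Set.add w nc.2 else w)
          PySem.Set.empty) s 0 0 PySem.Set.empty := by
    have hw := fun c => wanted_mem iprod p 0 PySem.Set.empty c
    simp only [Nat.cast_zero, Nat.zero_add] at hw
    apply Nat.eq_of_testBit_eq
    intro t
    rw [Bool.eq_iff_iff, aFoldN_testBit, bLoopN_testBit]
    simp only [Nat.zero_testBit, Bool.false_eq_true, false_or, List.mem_range]
    constructor
    · rintro ⟨nb, hnb, hg, hfind⟩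
      obtain ⟨pre, suf, hsplit, ht, hnotpre⟩ := (find_eq_first s (p.getD nb ' ') t).mp hfind
      refine ⟨pre, p.getD nb ' ', suf, hsplit, by omega, ?_, by simp [PySem.Set.empty], hnotpre⟩
      rw [hw]
      exact Or.inr ⟨nb, by omega, by rw [Int.shiftLeft_natCast_right]; exact hg, (List.getD_eq_getElem p ' ' (by omega)).symm⟩
    · rintro ⟨pre, c, suf, hsplit, ht, hcW, -, hnotpre⟩
      rw [hw] at hcW
      rcases hcW with h | ⟨k, hk, hg, hpk⟩
      · simp [PySem.Set.empty] at h
      · refine ⟨k, by omega, by rw [← Int.shiftLeft_natCast_right]; exact hg, ?_⟩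
        have : p.getD k ' ' = c := by rw [List.getD_eq_getElem p ' ' hk, hpk]
        rw [this]
        exact (find_eq_first s c t).mpr ⟨pre, suf, hsplit, by omega, hnotpre⟩
  rw [hval]
  exact if_congr (or_congr_right (and_congr_right fun _ => cond_iff substrate product)) rfl rfl
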